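-- pv_equiv track=rewrite | github.com/openvinotoolkit/training_extensions | pytorch_toolkit/instance_segmentation/segmentoly/utils/weight_converters.py | resnet_block
-- ===== SOURCE A (Python) =====
-- def resnet_block(stage_idx, block_idx, prefix='', normalization='bn'):
--     mapping_template_weights = {
--         'res{}_{}_branch2a_w': '{}stages.stage_{}.{}.conv1.weight',
--         'res{}_{}_branch2a_b': '',
--         'res{}_{}_branch2b_w': '{}stages.stage_{}.{}.conv2.weight',
--         'res{}_{}_branch2b_b': '',
--         'res{}_{}_branch2c_w': '{}stages.stage_{}.{}.conv3.weight',
--         'res{}_{}_branch2c_b': '',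
--     }
--     mapping = {k.format(stage_idx + 1, block_idx): v.format(prefix, stage_idx, block_idx)
--                for k, v in mapping_template_weights.items()}
--     mapping_template_norm = {
--         'res{}_{}_branch2a_{}_s': '{}stages.stage_{}.{}.bn1.weight',
--         'res{}_{}_branch2a_{}_b': '{}stages.stage_{}.{}.bn1.bias',
--         'res{}_{}_branch2b_{}_s': '{}stages.stage_{}.{}.bn2.weight',
--         'res{}_{}_branch2b_{}_b': '{}stages.stage_{}.{}.bn2.bias',
--         'res{}_{}_branch2c_{}_s': '{}stages.stage_{}.{}.bn3.weight',
--         'res{}_{}_branch2c_{}_b': '{}stages.stage_{}.{}.bn3.bias',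
--     }
--     mapping.update({k.format(stage_idx + 1, block_idx, normalization):
--                         v.format(prefix, stage_idx, block_idx)
--                     for k, v in mapping_template_norm.items()})
--     return mapping
-- ===== SOURCE B (Python) =====
-- def resnet_block(stage_idx, block_idx, prefix='', normalization='bn'):
--     key_base = 'res' + str(stage_idx + 1) + '_' + str(block_idx) + '_branch2'
--     val_base = prefix + 'stages.stage_' + str(stage_idx) + '.' + str(block_idx) + '.'
--     branches = (('a', '1'), ('b', '2'), ('c', '3'))
--     mapping = {}
--     for letter, i in branches:
--         mapping[key_base + letter + '_w'] = val_base + 'conv' + i + '.weight'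
--         mapping[key_base + letter + '_b'] = ''
--     for letter, i in branches:
--         mapping[key_base + letter + '_' + normalization + '_s'] = val_base + 'bn' + i + '.weight'
--         mapping[key_base + letter + '_' + normalization + '_b'] = val_base + 'bn' + i + '.bias'
--     return mapping
-- ===== Notes on version B (the rewrite author's own statement) =====
-- stated objective: simpler
-- what changed: Replaces the two 6-entry '{}'-template dicts and their .format comprehensions plus dict.update with one shared key/value base string and a single 3-row branch table (letter, conv index) iterated twice with direct dict assignment.
import Mathlib
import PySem

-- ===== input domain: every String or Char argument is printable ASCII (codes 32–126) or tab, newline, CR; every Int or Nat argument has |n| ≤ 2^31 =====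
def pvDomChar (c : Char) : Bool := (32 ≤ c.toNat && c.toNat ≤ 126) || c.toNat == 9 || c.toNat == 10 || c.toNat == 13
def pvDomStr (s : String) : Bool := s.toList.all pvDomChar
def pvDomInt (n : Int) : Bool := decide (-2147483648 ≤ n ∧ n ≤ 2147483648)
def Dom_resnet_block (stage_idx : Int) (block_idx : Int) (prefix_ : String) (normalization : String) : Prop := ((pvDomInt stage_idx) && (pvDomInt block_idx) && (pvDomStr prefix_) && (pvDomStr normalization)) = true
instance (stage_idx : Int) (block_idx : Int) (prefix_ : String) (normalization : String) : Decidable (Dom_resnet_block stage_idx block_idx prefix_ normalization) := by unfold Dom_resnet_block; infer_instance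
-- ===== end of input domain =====

-- B replaces A's two '{}'-template dicts, .format comprehensions and dict.update by one shared
-- key/value base string and a 3-row branch table iterated twice with direct assignment (objective: simpler).

-- ===== PORT A =====
-- '{}'.format with int/str arguments is ported exactly as string concatenation with PySem.Int.toStr
-- (Python '{}'.format(n) = str(n) for int n, and '{}'.format(s) = s for str s).
def resnet_block (stage_idx : Int) (block_idx : Int) (prefix_ : String) (normalization : String) : List (String × String) :=
  let s1 := PySem.Int.toStr (stage_idx + 1)
  let bi := PySem.Int.toStr block_idx
  let si := PySem.Int.toStr stage_idx
  -- the weight-template comprehension: each formatted (k, v) pair inserted into a fresh dict in template order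
  let weightPairs : List (String × String) :=
    [ ("res" ++ s1 ++ "_" ++ bi ++ "_branch2a_w", prefix_ ++ "stages.stage_" ++ si ++ "." ++ bi ++ ".conv1.weight"),
      ("res" ++ s1 ++ "_" ++ bi ++ "_branch2a_b", ""),
      ("res" ++ s1 ++ "_" ++ bi ++ "_branch2b_w", prefix_ ++ "stages.stage_" ++ si ++ "." ++ bi ++ ".conv2.weight"),
      ("res" ++ s1 ++ "_" ++ bi ++ "_branch2b_b", ""),
      ("res" ++ s1 ++ "_" ++ bi ++ "_branch2c_w", prefix_ ++ "stages.stage_" ++ si ++ "." ++ bi ++ ".conv3.weight"),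
      ("res" ++ s1 ++ "_" ++ bi ++ "_branch2c_b", "") ]
  let mapping : PySem.Dict String String :=
    weightPairs.foldl (fun d kv => d.insert kv.1 kv.2) PySem.Dict.empty
  -- the norm-template comprehension, then mapping.update(...)
  let normPairs : List (String × String) :=
    [ ("res" ++ s1 ++ "_" ++ bi ++ "_branch2a_" ++ normalization ++ "_s", prefix_ ++ "stages.stage_" ++ si ++ "." ++ bi ++ ".bn1.weight"),
      ("res" ++ s1 ++ "_" ++ bi ++ "_branch2a_" ++ normalization ++ "_b", prefix_ ++ "stages.stage_" ++ si ++ "." ++ bi ++ ".bn1.bias"),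
      ("res" ++ s1 ++ "_" ++ bi ++ "_branch2b_" ++ normalization ++ "_s", prefix_ ++ "stages.stage_" ++ si ++ "." ++ bi ++ ".bn2.weight"),
      ("res" ++ s1 ++ "_" ++ bi ++ "_branch2b_" ++ normalization ++ "_b", prefix_ ++ "stages.stage_" ++ si ++ "." ++ bi ++ ".bn2.bias"),
      ("res" ++ s1 ++ "_" ++ bi ++ "_branch2c_" ++ normalization ++ "_s", prefix_ ++ "stages.stage_" ++ si ++ "." ++ bi ++ ".bn3.weight"),
      ("res" ++ s1 ++ "_" ++ bi ++ "_branch2c_" ++ normalization ++ "_b", prefix_ ++ "stages.stage_" ++ si ++ "." ++ bi ++ ".bn3.bias") ]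
  let normDict : PySem.Dict String String :=
    normPairs.foldl (fun d kv => d.insert kv.1 kv.2) PySem.Dict.empty
  (PySem.Dict.update mapping normDict.items).items

-- ===== PORT B =====
def resnet_block_alt (stage_idx : Int) (block_idx : Int) (prefix_ : String) (normalization : String) : List (String × String) :=
  let key_base := "res" ++ PySem.Int.toStr (stage_idx + 1) ++ "_" ++ PySem.Int.toStr block_idx ++ "_branch2"
  let val_base := prefix_ ++ "stages.stage_" ++ PySem.Int.toStr stage_idx ++ "." ++ PySem.Int.toStr block_idx ++ "."
  let branches : List (String × String) := [("a", "1"), ("b", "2"), ("c", "3")]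
  let mapping : PySem.Dict String String :=
    branches.foldl (fun d li =>
      (d.insert (key_base ++ li.1 ++ "_w") (val_base ++ "conv" ++ li.2 ++ ".weight")).insert
        (key_base ++ li.1 ++ "_b") "") PySem.Dict.empty
  let mapping :=
    branches.foldl (fun d li =>
      (d.insert (key_base ++ li.1 ++ "_" ++ normalization ++ "_s") (val_base ++ "bn" ++ li.2 ++ ".weight")).insert
        (key_base ++ li.1 ++ "_" ++ normalization ++ "_b") (val_base ++ "bn" ++ li.2 ++ ".bias")) mapping
  mapping.items

-- ===== PRECONDITION & SPEC =====
def Spec_resnet_block (stage_idx : Int) (block_idx : Int) (prefix_ : String) (normalization : String) (out : List (String × String)) : Prop := out = resnet_block_alt stage_idx block_idx prefix_ normalization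
instance (stage_idx : Int) (block_idx : Int) (prefix_ : String) (normalization : String) (out : List (String × String)) : Decidable (Spec_resnet_block stage_idx block_idx prefix_ normalization out) := by unfold Spec_resnet_block; infer_instance

-- ===== CLAIM (what is proved, stated in full; the proofs are below) =====
def Claim_equal_resnet_block : Prop := ∀ (stage_idx : Int) (block_idx : Int) (prefix_ : String) (normalization : String), Dom_resnet_block stage_idx block_idx prefix_ normalization → Spec_resnet_block stage_idx block_idx prefix_ normalization (resnet_block stage_idx block_idx prefix_ normalization)

-- ===== LEMMAS AND PROOFS =====

-- folding key-fresh pairs into a dict appends them to its items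
theorem pv_foldl_insert_items {κ ν : Type} [BEq κ] [LawfulBEq κ] :
    ∀ (ps : List (κ × ν)) (d : PySem.Dict κ ν),
      (∀ p ∈ ps, d.contains p.1 = false) → (ps.map Prod.fst).Nodup →
      (ps.foldl (fun d kv => d.insert kv.1 kv.2) d).items = d.items ++ ps := by
  intro ps
  induction ps with
  | nil => intro d _ _; simp
  | cons hd tl ih =>
    intro d hfresh hnodup
    rw [List.map_cons] at hnodup
    have hnd := List.nodup_cons.mp hnodup
    simp only [List.foldl]
    rw [ih]
    · rw [PySem.Dict.items_insert_of_not_contains _ _ (hfresh hd (by simp))]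
      simp
    · intro p hp
      rw [PySem.Dict.contains_insert]
      have hne : p.1 ≠ hd.1 := by
        intro h; exact hnd.1 (h ▸ List.mem_map_of_mem hp)
      simp [hne, hfresh p (List.mem_cons_of_mem _ hp)]
    · exact hnd.2

-- ===== VERDICT (by name: the statement is the Claim_ definition above) =====
theorem resnet_block_spec : Claim_equal_resnet_block := by
  intro s b p n _
  unfold Spec_resnet_block resnet_block resnet_block_alt
  dsimp only
  rw [pv_foldl_insert_items _ PySem.Dict.empty (by intro p hp; simp [PySem.Dict.contains_empty])
        (by simp [String.ext_iff])]
  simp only [PySem.Dict.update, PySem.Dict.empty, List.foldl, List.nil_append, String.append_assoc,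
    String.reduceAppend]
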